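-- pv_equiv track=rewrite | github.com/vs3kulic/open-elis | app/calculate_cluster.py | calculate_cluster
-- ===== SOURCE A (Python) =====
-- def calculate_cluster(scores):
--     """
--     Determines the cluster with the highest score.
--
--     Args:
--         scores (dict): Scores for each cluster.
--
--     Returns:
--         str: The cluster with the highest score.
--     """
--     # Add score tuples to a list for sorting
--     sorted_scores = []
--     for cluster, score in scores.items():
--         sorted_scores.append((cluster, score))
--
--     # Perform bubble sort to sort scores in descending order
--     for i in range(len(sorted_scores)):
--         for j in range(i + 1, len(sorted_scores)):
--             if sorted_scores[i][1] < sorted_scores[j][1]: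
--                 sorted_scores[i], sorted_scores[j] = sorted_scores[j], sorted_scores[i]
--
--     # Get the key of the highest score
--     best_cluster = sorted_scores[0][0]
--     return best_cluster
-- ===== SOURCE B (Python) =====
-- def calculate_cluster(scores):
--     """
--     Determines the cluster with the highest score.
--
--     Single linear pass maintaining the running maximum (strict > keeps the
--     first-inserted cluster on ties), instead of the O(n^2) bubble sort.
--     """
--     items = list(scores.items())
--     best = items[0]
--     for item in items[1:]:
--         if item[1] > best[1]:
--             best = item
--     return best[0]
-- ===== Notes on version B (the rewrite author's own statement) =====
-- stated objective: faster
-- what changed: Replaced the O(n^2) bubble sort of the full score list with a single linear pass that keeps the running maximum (strict > preserves the first-occurrence tie-break), returning its key.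
import Mathlib
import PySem

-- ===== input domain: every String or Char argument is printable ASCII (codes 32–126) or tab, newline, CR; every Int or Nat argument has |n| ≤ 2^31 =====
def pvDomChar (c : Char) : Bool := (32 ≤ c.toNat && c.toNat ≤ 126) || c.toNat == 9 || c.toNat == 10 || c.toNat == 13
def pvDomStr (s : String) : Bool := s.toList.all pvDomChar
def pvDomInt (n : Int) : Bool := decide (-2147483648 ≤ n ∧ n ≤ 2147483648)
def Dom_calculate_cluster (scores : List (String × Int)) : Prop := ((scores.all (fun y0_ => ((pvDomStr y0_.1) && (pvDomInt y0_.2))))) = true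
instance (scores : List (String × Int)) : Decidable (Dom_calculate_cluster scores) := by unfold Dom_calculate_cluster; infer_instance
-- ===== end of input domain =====

-- B replaces A's O(n^2) bubble sort with one linear pass keeping the running maximum.
-- Equivalence is about the RETURN value on non-empty inputs (A raises IndexError on {}).

-- ===== PORT A =====
-- one inner-loop step of the bubble sort: compare positions i and j, swap if l[i][1] < l[j][1]
def pvInnerStep (i : Nat) (l : List (String × Int)) (j : Nat) : List (String × Int) :=
  match l[i]?, l[j]? with
  | some a, some b => if a.2 < b.2 then (l.set i b).set j a else l
  | _, _ => l  -- unreachable in A (i, j are always in range); totality guard only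

def calculate_cluster (scores : List (String × Int)) : String :=
  -- "for cluster, score in scores.items(): sorted_scores.append((cluster, score))"
  let sorted_scores := scores.foldl (fun acc p => acc ++ [p]) []
  let n := sorted_scores.length
  -- "for i in range(n): for j in range(i+1, n): if … swap"
  let final := (List.range n).foldl
    (fun l i => (List.range' (i + 1) (n - (i + 1))).foldl (fun l j => pvInnerStep i l j) l) sorted_scores
  -- "sorted_scores[0][0]"; empty input (IndexError in Python) is excluded by Pre_
  (final.headD ("", 0)).1

-- ===== PORT B =====
def calculate_cluster_alt (scores : List (String × Int)) : String :=
  match scores with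
  | [] => ""  -- Python B raises IndexError here; excluded by Pre_
  | x :: rest => (rest.foldl (fun best item => if item.2 > best.2 then item else best) x).1

-- ===== PRECONDITION & SPEC =====
-- Pre_ excludes exactly the empty dict, on which both A and B raise IndexError.
def Pre_calculate_cluster (scores : List (String × Int)) : Prop := scores ≠ []
instance (scores : List (String × Int)) : Decidable (Pre_calculate_cluster scores) := by
  unfold Pre_calculate_cluster; infer_instance

def pvWitness_calculate_cluster : (List (String × Int)) := [("a", 1), ("b", 3), ("c", 3)]

def Spec_calculate_cluster (scores : List (String × Int)) (out : String) : Prop := out = calculate_cluster_alt scores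
instance (scores : List (String × Int)) (out : String) : Decidable (Spec_calculate_cluster scores out) := by unfold Spec_calculate_cluster; infer_instance

-- ===== CLAIM (what is proved, stated in full; the proofs are below) =====
def Claim_equal_calculate_cluster : Prop := ∀ (scores : List (String × Int)), Dom_calculate_cluster scores → Pre_calculate_cluster scores → Spec_calculate_cluster scores (calculate_cluster scores)

-- ===== LEMMAS AND PROOFS =====

-- A's first loop is the identity copy
lemma pv_copy_eq (scores : List (String × Int)) :
    scores.foldl (fun acc p => acc ++ [p]) [] = scores := by
  suffices h : ∀ (acc : List (String × Int)), scores.foldl (fun acc p => acc ++ [p]) acc = acc ++ scores by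
    simpa using h []
  induction scores with
  | nil => intro acc; simp
  | cons x xs ih => intro acc; simp [List.foldl, ih]

-- the i = 0 pass of the bubble sort: position 0 ends up holding the running maximum
lemma pv_pass0 (t : List (String × Int)) :
    ∀ (mid : List (String × Int)) (b : String × Int),
      ∃ r, (List.range' (mid.length + 1) t.length).foldl (fun l j => pvInnerStep 0 l j) (b :: mid ++ t)
            = (t.foldl (fun best item => if item.2 > best.2 then item else best) b) :: r := by
  induction t with
  | nil => intro mid b; exact ⟨mid, by simp⟩
  | cons t0 t' ih =>
    intro mid b
    have hrange : List.range' (mid.length + 1) (t0 :: t').length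
        = (mid.length + 1) :: List.range' (mid.length + 1 + 1) t'.length := by
      simp [List.range'_succ]
    have hget0 : (b :: mid ++ (t0 :: t'))[0]? = some b := by simp
    have hgetk : (b :: mid ++ (t0 :: t'))[mid.length + 1]? = some t0 := by
      simp
    by_cases hlt : b.2 < t0.2
    · have hstep : pvInnerStep 0 (b :: mid ++ (t0 :: t')) (mid.length + 1)
          = t0 :: (mid ++ [b]) ++ t' := by
        simp only [pvInnerStep, hget0, hgetk, if_pos hlt]
        have h1 : (b :: mid ++ (t0 :: t')).set 0 t0 = t0 :: mid ++ (t0 :: t') := by simp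
        rw [h1]
        have h2 : (t0 :: mid ++ (t0 :: t')).set (mid.length + 1) b
            = t0 :: (mid ++ (t0 :: t')).set mid.length b := by
          rfl
        rw [h2]
        have h3 : (mid ++ (t0 :: t')).set mid.length b = mid ++ (b :: t') := by
          rw [List.set_append_right _ _ (le_refl mid.length)]
          simp
        rw [h3]; simp
      obtain ⟨r, hr⟩ := ih (mid ++ [b]) t0
      refine ⟨r, ?_⟩
      rw [hrange]
      simp only [List.foldl_cons, hstep]
      have : mid.length + 1 + 1 = (mid ++ [b]).length + 1 := by simp
      rw [this]
      rw [hr]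
      simp [if_pos (show t0.2 > b.2 from hlt)]
    · have hstep : pvInnerStep 0 (b :: mid ++ (t0 :: t')) (mid.length + 1)
          = b :: (mid ++ [t0]) ++ t' := by
        simp only [pvInnerStep, hget0, hgetk, if_neg hlt]
        simp
      obtain ⟨r, hr⟩ := ih (mid ++ [t0]) b
      refine ⟨r, ?_⟩
      rw [hrange]
      simp only [List.foldl_cons, hstep]
      have : mid.length + 1 + 1 = (mid ++ [t0]).length + 1 := by simp
      rw [this, hr]
      simp [if_neg (show ¬ t0.2 > b.2 from hlt)]

-- an inner step at indices i ≠ 0, j ≠ 0 does not touch position 0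
lemma pv_innerStep_get0 (i j : Nat) (l : List (String × Int)) (hi : i ≠ 0) (hj : j ≠ 0) :
    (pvInnerStep i l j)[0]? = l[0]? := by
  unfold pvInnerStep
  cases hli : l[i]? with
  | none => rfl
  | some a =>
    cases hlj : l[j]? with
    | none => rfl
    | some b =>
      by_cases h : a.2 < b.2
      · simp only [if_pos h]
        rw [List.getElem?_set_ne (by omega), List.getElem?_set_ne (by omega)]
      · simp [h]

-- all passes with i ≥ 1 leave position 0 unchanged
lemma pv_later_passes_get0 (n : Nat) (is : List Nat) (h : ∀ i ∈ is, i ≠ 0) :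
    ∀ (l : List (String × Int)),
      (is.foldl (fun l i => (List.range' (i + 1) (n - (i + 1))).foldl (fun l j => pvInnerStep i l j) l) l)[0]?
        = l[0]? := by
  induction is with
  | nil => intro l; rfl
  | cons i0 is' ih =>
    intro l
    simp only [List.foldl_cons]
    rw [ih (fun i hi => h i (List.mem_cons_of_mem _ hi))]
    have hi0 : i0 ≠ 0 := h i0 (List.mem_cons_self)
    -- the inner pass over j preserves position 0
    have hinner : ∀ (js : List Nat) (l : List (String × Int)), (∀ j ∈ js, j ≠ 0) →
        (js.foldl (fun l j => pvInnerStep i0 l j) l)[0]? = l[0]? := by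
      intro js
      induction js with
      | nil => intro l _; rfl
      | cons j0 js' ihj =>
        intro l hjs
        simp only [List.foldl_cons]
        rw [ihj _ (fun j hj => hjs j (List.mem_cons_of_mem _ hj)),
            pv_innerStep_get0 i0 j0 l hi0 (hjs j0 List.mem_cons_self)]
    apply hinner
    intro j hj
    have := (List.mem_range'_1.mp hj).1
    omega

-- ===== VERDICT (by name: the statement is the Claim_ definition above) =====
theorem calculate_cluster_spec : Claim_equal_calculate_cluster := by
  intro scores _ hpre
  unfold Spec_calculate_cluster
  match scores, hpre with
  | x :: rest, _ =>
    simp only [calculate_cluster, calculate_cluster_alt, pv_copy_eq]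
    have hn : (x :: rest).length = rest.length + 1 := by simp
    have hrange : List.range (x :: rest).length = 0 :: List.range' 1 rest.length := by
      rw [hn, List.range_eq_range']
      simp [List.range'_succ]
    rw [hrange]
    simp only [List.foldl_cons]
    obtain ⟨r, hr⟩ := pv_pass0 rest [] x
    have h0 : (List.range' (0 + 1) ((x :: rest).length - (0 + 1))).foldl
        (fun l j => pvInnerStep 0 l j) (x :: rest)
        = (rest.foldl (fun best item => if item.2 > best.2 then item else best) x) :: r := by
      have : (x :: rest).length - (0 + 1) = rest.length := by simp
      rw [this]
      simpa using hr
    rw [h0]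
    have hget := pv_later_passes_get0 (x :: rest).length (List.range' 1 rest.length)
      (by intro i hi; have := (List.mem_range'_1.mp hi).1; omega)
      ((rest.foldl (fun best item => if item.2 > best.2 then item else best) x) :: r)
    have hhead : ((List.range' 1 rest.length).foldl
        (fun l i => (List.range' (i + 1) ((x :: rest).length - (i + 1))).foldl (fun l j => pvInnerStep i l j) l)
        ((rest.foldl (fun best item => if item.2 > best.2 then item else best) x) :: r)).headD ("", 0)
        = rest.foldl (fun best item => if item.2 > best.2 then item else best) x := by
      have := hget
      simp only [List.getElem?_cons_zero] at this
      rw [List.headD_eq_head?, List.head?_eq_getElem?, this]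
      rfl
    rw [hhead]
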